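-- pv_equiv track=rewrite | github.com/goosekiing/the-big-book-of-small-python-projects | project-02-birthday-paradox/main.py | get_matched_birthdays
-- ===== SOURCE A (Python) =====
-- def there_is_repeated_birthdays(birthdays:list) -> bool:
--     return False if len(birthdays) == len(set(birthdays)) else True
--
-- def get_matched_birthdays(birthdays:list) -> list:
--     """função para retornar umas lista com os aniversarios repetidos"""
--     if not there_is_repeated_birthdays(birthdays):
--         return None
--     else:
--         counter = {}
--         repeated_birthdays = []
--         for birthday in birthdays:
--             if birthday not in counter:
--                 counter[birthday] = 1
--             else:
--                 counter[birthday] += 1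
--
--     for birthday, count in counter.items():
--         if count > 1:
--             repeated_birthdays.append(birthday)
--
--     repeated_birthdays.sort()
--     return repeated_birthdays
-- ===== SOURCE B (Python) =====
-- def get_matched_birthdays(birthdays: list) -> list:
--     """Single pass over a sorted copy: detect maximal runs of equal values;
--     each run longer than 1 contributes its value once (already in sorted order)."""
--     s = sorted(birthdays)
--     n = len(s)
--     repeated = []
--     i = 0
--     while i < n:
--         j = i + 1
--         while j < n and s[j] == s[i]:
--             j += 1
--         if j - i > 1:
--             repeated.append(s[i])
--         i = j
--     return repeated if repeated else None
-- ===== Notes on version B (the rewrite author's own statement) =====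
-- stated objective: alternative
-- what changed: Replaces the dict frequency table, the items-filter loop and the final sort by one run-detection pass over a sorted copy of the input, which yields the repeated values already sorted.
import Mathlib
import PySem

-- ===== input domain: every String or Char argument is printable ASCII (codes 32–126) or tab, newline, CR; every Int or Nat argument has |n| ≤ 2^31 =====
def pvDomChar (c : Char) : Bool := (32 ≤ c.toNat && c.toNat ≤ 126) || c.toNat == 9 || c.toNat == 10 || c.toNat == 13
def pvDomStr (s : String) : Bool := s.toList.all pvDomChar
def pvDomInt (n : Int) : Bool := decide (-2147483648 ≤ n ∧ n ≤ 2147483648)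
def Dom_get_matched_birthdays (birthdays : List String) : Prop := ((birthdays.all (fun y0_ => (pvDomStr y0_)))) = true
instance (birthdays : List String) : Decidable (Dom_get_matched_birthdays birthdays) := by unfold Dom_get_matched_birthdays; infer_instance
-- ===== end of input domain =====

-- B replaces A's dict frequency table + items-filter loop + final sort by one recursive
-- run-detection pass over a sorted copy of the input (objective: alternative, same cost).

-- ===== PORT A =====
def there_is_repeated_birthdays (birthdays : List String) : Bool :=
  if birthdays.length == (PySem.Set.ofList birthdays).length then false else true

def get_matched_birthdays (birthdays : List String) : Option (List String) :=
  if !(there_is_repeated_birthdays birthdays) then none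
  else
    let counter := birthdays.foldl
      (fun (d : PySem.Dict String Int) b =>
        if !(d.contains b) then d.insert b 1 else d.insert b (d.getD b 0 + 1))
      PySem.Dict.empty
    let repeated := counter.items.foldl
      (fun (acc : List String) p => if p.2 > 1 then acc ++ [p.1] else acc) []
    some (PySem.List.sorted repeated (fun x => x) false)

-- ===== PORT B =====
-- Source B's outer while loop over the sorted list, as recursion on the remaining suffix:
-- the inner while loop advancing j over the run is the maximal equal prefix (takeWhile),
-- and continuing at i = j is recursing on the corresponding dropWhile.
def pvCollect : List String → List String
  | [] => []
  | x :: rest =>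
    let run := (rest.takeWhile (fun y => y == x)).length + 1
    let rest' := rest.dropWhile (fun y => y == x)
    if run > 1 then x :: pvCollect rest' else pvCollect rest'
termination_by l => l.length
decreasing_by
  all_goals
    simpa using Nat.lt_succ_of_le (List.length_dropWhile_le _ rest)

def get_matched_birthdays_alt (birthdays : List String) : Option (List String) :=
  let repeated := pvCollect (PySem.List.sorted birthdays (fun x => x) false)
  if repeated.isEmpty then none else some repeated

-- ===== PRECONDITION & SPEC =====
def Spec_get_matched_birthdays (birthdays : List String) (out : Option (List String)) : Prop := out = get_matched_birthdays_alt birthdays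
instance (birthdays : List String) (out : Option (List String)) : Decidable (Spec_get_matched_birthdays birthdays out) := by unfold Spec_get_matched_birthdays; infer_instance

-- ===== CLAIM (what is proved, stated in full; the proofs are below) =====
def Claim_equal_get_matched_birthdays : Prop := ∀ (birthdays : List String), Dom_get_matched_birthdays birthdays → Spec_get_matched_birthdays birthdays (get_matched_birthdays birthdays)

-- ===== LEMMAS AND PROOFS =====

-- every element of dropWhile (· == x) in a sorted list is strictly greater than x
lemma gt_of_mem_dropWhile {x : String} {rest : List String}
    (h : (x :: rest).Pairwise (· ≤ ·)) :
    ∀ z ∈ rest.dropWhile (fun y => y == x), x < z := by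
  obtain ⟨hx, hrest⟩ := List.pairwise_cons.mp h
  have hsub : (rest.dropWhile (fun y => y == x)).Sublist rest := List.dropWhile_sublist _
  have hpr : (rest.dropWhile (fun y => y == x)).Pairwise (· ≤ ·) := hrest.sublist hsub
  intro z hz
  cases hrc : rest.dropWhile (fun y => y == x) with
  | nil => rw [hrc] at hz; simp at hz
  | cons a tl =>
    have hpa : (a == x) = false := by
      have h2 := List.head?_dropWhile_not (fun y => y == x) rest
      rw [hrc] at h2
      simpa using h2
    have hane : a ≠ x := by simpa using hpa
    have hamem : a ∈ rest := hsub.subset (by rw [hrc]; simp)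
    have hxa : x < a := lt_of_le_of_ne (hx _ hamem) (Ne.symm hane)
    rw [hrc] at hz hpr
    rcases List.mem_cons.mp hz with rfl | hz'
    · exact hxa
    · exact lt_of_lt_of_le hxa ((List.pairwise_cons.mp hpr).1 _ hz')

lemma mem_pvCollect (l : List String) (h : l.Pairwise (· ≤ ·)) (y : String) :
    y ∈ pvCollect l ↔ 2 ≤ l.count y := by
  induction l using pvCollect.induct with
  | case1 => simp [pvCollect]
  | case2 x rest run rest' _hgt ih | case3 x rest run rest' _hgt ih =>
    have ihv : (rest.dropWhile (fun y => y == x)).Pairwise (· ≤ ·) →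
        (y ∈ pvCollect (rest.dropWhile (fun y => y == x)) ↔
          2 ≤ (rest.dropWhile (fun y => y == x)).count y) := ih
    obtain ⟨hx, hrest⟩ := List.pairwise_cons.mp h
    have hsplit : rest.takeWhile (fun y => y == x) ++ rest.dropWhile (fun y => y == x) = rest :=
      List.takeWhile_append_dropWhile
    have ht : ∀ a ∈ rest.takeWhile (fun y => y == x), a = x := by
      intro a ha
      simpa using List.mem_takeWhile_imp ha
    have hpr : (rest.dropWhile (fun y => y == x)).Pairwise (· ≤ ·) :=
      hrest.sublist (List.dropWhile_sublist _)
    have hxr := gt_of_mem_dropWhile h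
    have hxnr : x ∉ rest.dropWhile (fun y => y == x) := fun hm => lt_irrefl x (hxr x hm)
    have hcx : rest.count x = (rest.takeWhile (fun y => y == x)).length := by
      conv_lhs => rw [← hsplit]
      rw [List.count_append, List.count_eq_zero.mpr hxnr,
        List.count_eq_length.mpr (fun b hb => (ht b hb).symm)]
      omega
    have hcy : ∀ z, z ≠ x → rest.count z = (rest.dropWhile (fun y => y == x)).count z := by
      intro z hzx
      conv_lhs => rw [← hsplit]
      rw [List.count_append, List.count_eq_zero.mpr (fun hm => hzx (ht z hm))]
      omega
    have ihr := ihv hpr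
    rw [show pvCollect (x :: rest)
        = if (rest.takeWhile (fun y => y == x)).length + 1 > 1
          then x :: pvCollect (rest.dropWhile (fun y => y == x))
          else pvCollect (rest.dropWhile (fun y => y == x)) from by
      simp only [pvCollect]]
    by_cases hyx : y = x
    · subst hyx
      rw [List.count_cons_self]
      by_cases htw : (rest.takeWhile (fun w => w == y)).length + 1 > 1
      · rw [if_pos htw]
        constructor
        · intro _
          omega
        · intro _
          exact List.mem_cons.mpr (Or.inl rfl)
      · rw [if_neg htw]
        constructor
        · intro hm
          have h2 := ihr.mp hm
          rw [List.count_eq_zero.mpr hxnr] at h2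
          omega
        · intro hc
          exfalso
          omega
    · have hcount : (x :: rest).count y = (rest.dropWhile (fun w => w == x)).count y := by
        rw [List.count_cons, hcy y hyx]
        simp [Ne.symm hyx]
      rw [hcount, ← ihr]
      by_cases htw : (rest.takeWhile (fun w => w == x)).length + 1 > 1
      · rw [if_pos htw]
        simp [List.mem_cons, hyx]
      · rw [if_neg htw]

lemma pairwise_pvCollect (l : List String) (h : l.Pairwise (· ≤ ·)) :
    (pvCollect l).Pairwise (· < ·) := by
  induction l using pvCollect.induct with
  | case1 => simp [pvCollect]
  | case2 x rest run rest' _hgt ih | case3 x rest run rest' _hgt ih =>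
    have ihv : (rest.dropWhile (fun y => y == x)).Pairwise (· ≤ ·) →
        (pvCollect (rest.dropWhile (fun y => y == x))).Pairwise (· < ·) := ih
    obtain ⟨hx, hrest⟩ := List.pairwise_cons.mp h
    have hpr : (rest.dropWhile (fun y => y == x)).Pairwise (· ≤ ·) :=
      hrest.sublist (List.dropWhile_sublist _)
    have hxr := gt_of_mem_dropWhile h
    have ihr := ihv hpr
    rw [show pvCollect (x :: rest)
        = if (rest.takeWhile (fun y => y == x)).length + 1 > 1
          then x :: pvCollect (rest.dropWhile (fun y => y == x))
          else pvCollect (rest.dropWhile (fun y => y == x)) from by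
      simp only [pvCollect]]
    by_cases htw : (rest.takeWhile (fun w => w == x)).length + 1 > 1
    · rw [if_pos htw]
      refine List.pairwise_cons.mpr ⟨?_, ihr⟩
      intro y hy
      have hc := (mem_pvCollect _ hpr y).mp hy
      have hmem : y ∈ rest.dropWhile (fun w => w == x) :=
        List.count_pos_iff.mp (by omega)
      exact hxr y hmem
    · rw [if_neg htw]
      exact ihr

-- A's counting loop is Counter(birthdays)
lemma counter_fold_eq (xs : List String) :
    xs.foldl (fun (d : PySem.Dict String Int) b =>
        if !(d.contains b) then d.insert b 1 else d.insert b (d.getD b 0 + 1))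
      PySem.Dict.empty = PySem.Dict.counter xs := by
  have hfun : (fun (d : PySem.Dict String Int) b =>
      if !(d.contains b) then d.insert b 1 else d.insert b (d.getD b 0 + 1))
      = fun d b => d.insert b (d.getD b 0 + 1) := by
    funext d b
    cases hc : d.contains b with
    | false => simp [hc, PySem.Dict.getD_of_not_contains]
    | true => simp
  rw [hfun, PySem.Dict.foldl_insert_getD_add_one_eq_counter]

-- A's items-filter loop is a filter
lemma foldl_filter_gt1 (l : List String) (g : String → Int) (acc : List String) :
    l.foldl (fun acc k => if g k > 1 then acc ++ [k] else acc) acc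
      = acc ++ l.filter (fun k => decide (1 < g k)) := by
  induction l generalizing acc with
  | nil => simp
  | cons a l ih =>
    by_cases hga : 1 < g a
    · simp [hga, ih, List.foldl_cons, gt_iff_lt]
    · simp [hga, ih, List.foldl_cons, gt_iff_lt]

-- PySem.Set.ofList xs is a sublist of xs
lemma ofList_sublist (xs : List String) : (PySem.Set.ofList xs).Sublist xs := by
  induction xs with
  | nil => simp [PySem.Set.ofList_nil]
  | cons x xs ih =>
    rw [PySem.Set.ofList_cons]
    refine List.Sublist.cons₂ x (List.Sublist.trans ?_ ih)
    simp only [PySem.Set.discard]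
    exact List.filter_sublist

lemma length_ofList_eq_iff (xs : List String) :
    (PySem.Set.ofList xs).length = xs.length ↔ xs.Nodup := by
  constructor
  · intro hlen
    have heq := (ofList_sublist xs).eq_of_length hlen
    exact heq ▸ PySem.Set.nodup_ofList xs
  · intro h
    rw [PySem.Set.ofList_eq_self_of_nodup xs h]

-- the two computed duplicate lists agree
lemma main_lists_eq (xs : List String) :
    PySem.List.sorted ((PySem.Set.ofList xs).filter (fun k => decide (1 < (xs.count k : Int)))) (fun x => x) false
      = pvCollect (PySem.List.sorted xs (fun x => x) false) := by
  have hpw : (PySem.List.sorted xs (fun x => x) false).Pairwise (· ≤ ·) := by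
    simpa using PySem.List.sorted_pairwise (xs := xs) (key := fun x => x)
  have hcnt : ∀ a : String, (PySem.List.sorted xs (fun x => x) false).count a = xs.count a :=
    fun a => (PySem.List.sorted_perm (xs := xs) (key := fun x => x) (rev := false)).count_eq a
  have hnd1 : (pvCollect (PySem.List.sorted xs (fun x => x) false)).Nodup :=
    (pairwise_pvCollect _ hpw).imp (fun h => ne_of_lt h)
  have hnd2 : ((PySem.Set.ofList xs).filter (fun k => decide (1 < (xs.count k : Int)))).Nodup :=
    (PySem.Set.nodup_ofList xs).filter _
  apply PySem.List.sorted_eq_of_perm_of_pairwise_lt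
  · refine (List.perm_ext_iff_of_nodup hnd1 hnd2).mpr ?_
    intro a
    rw [mem_pvCollect _ hpw a, hcnt a, List.mem_filter, PySem.Set.mem_ofList]
    constructor
    · intro hc
      refine ⟨List.count_pos_iff.mp (by omega), by simp; exact_mod_cast (by omega : (2:Int) ≤ (xs.count a : Int))⟩
    · rintro ⟨-, hd⟩
      have : (1:Int) < (xs.count a : Int) := by simpa using hd
      exact_mod_cast this
  · simpa using pairwise_pvCollect _ hpw

-- ===== VERDICT (by name: the statement is the Claim_ definition above) =====
theorem get_matched_birthdays_spec : Claim_equal_get_matched_birthdays := by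
  intro xs _
  unfold Spec_get_matched_birthdays
  have hpw : (PySem.List.sorted xs (fun x => x) false).Pairwise (· ≤ ·) := by
    simpa using PySem.List.sorted_pairwise (xs := xs) (key := fun x => x)
  have hcnt : ∀ a : String, (PySem.List.sorted xs (fun x => x) false).count a = xs.count a :=
    fun a => (PySem.List.sorted_perm (xs := xs) (key := fun x => x) (rev := false)).count_eq a
  by_cases hnd : xs.Nodup
  · have hlen : xs.length = (PySem.Set.ofList xs).length :=
      ((length_ofList_eq_iff xs).mpr hnd).symm
    have hB : pvCollect (PySem.List.sorted xs (fun x => x) false) = [] := by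
      rw [List.eq_nil_iff_forall_not_mem]
      intro a ha
      have h2 := (mem_pvCollect _ hpw a).mp ha
      rw [hcnt a] at h2
      have h1 := List.nodup_iff_count_le_one.mp hnd a
      omega
    simp [get_matched_birthdays, get_matched_birthdays_alt, there_is_repeated_birthdays, hlen, hB]
  · have hlen : ¬ (xs.length = (PySem.Set.ofList xs).length) := by
      intro e
      exact hnd ((length_ofList_eq_iff xs).mp e.symm)
    obtain ⟨a, ha⟩ : ∃ a, 2 ≤ xs.count a := by
      by_contra hno
      push Not at hno
      exact hnd (List.nodup_iff_count_le_one.mpr (fun a => by have := hno a; omega))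
    have hBne : pvCollect (PySem.List.sorted xs (fun x => x) false) ≠ [] := by
      intro e
      have hm : a ∈ pvCollect (PySem.List.sorted xs (fun x => x) false) :=
        (mem_pvCollect _ hpw a).mpr (by rw [hcnt a]; exact ha)
      rw [e] at hm
      simp at hm
    have hA : get_matched_birthdays xs
        = some (PySem.List.sorted ((PySem.Set.ofList xs).filter (fun k => decide (1 < (xs.count k : Int)))) (fun x => x) false) := by
      simp only [get_matched_birthdays, there_is_repeated_birthdays, counter_fold_eq,
        PySem.Dict.items_counter, List.foldl_map]
      rw [foldl_filter_gt1 ((PySem.Set.ofList xs)) (fun k => (xs.count k : Int))]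
      simp [hlen]
    have hB : get_matched_birthdays_alt xs
        = some (pvCollect (PySem.List.sorted xs (fun x => x) false)) := by
      simp only [get_matched_birthdays_alt]
      rw [if_neg (by simpa [List.isEmpty_iff] using hBne)]
    rw [hA, hB, main_lists_eq]
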